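-- pv_equiv track=rewrite | github.com/Minokun/auto_coin | utils/phone_opt.py | get_user_passwd
-- ===== SOURCE A (Python) =====
-- device_passwd = {
--     "wxk": "910729",
--     "fl": "191729",
--     "cpc": "2325",
--     "cpc2": "123456"
-- }
--
-- device_user = {
--     "wxk": ["192.168.101.101:5555", "192.168.31.123:5555", "QKXUT20329000108"],
--     "fl": ["192.168.101.100:5555", "94P0220C01001100"],
--     "cpc": ["192.168.101.103:5555", "192.168.31.212:5555"],
--     "cpc2": ["192.168.101.104:5555", "192.168.31.227:5555"]
-- }
--
-- def get_user_passwd(device_id):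
--     # 获取用户锁屏密码
--     user = ''
--     for k, v in device_user.items():
--         if device_id in v:
--             user = k
--             break
--     if not user:
--         return ''
--     if user not in device_passwd.keys():
--         return ''
--     return device_passwd[user]
-- ===== SOURCE B (Python) =====
-- device_passwd = {
--     "wxk": "910729",
--     "fl": "191729",
--     "cpc": "2325",
--     "cpc2": "123456"
-- }
--
-- device_user = {
--     "wxk": ["192.168.101.101:5555", "192.168.31.123:5555", "QKXUT20329000108"],
--     "fl": ["192.168.101.100:5555", "94P0220C01001100"],
--     "cpc": ["192.168.101.103:5555", "192.168.31.212:5555"],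
--     "cpc2": ["192.168.101.104:5555", "192.168.31.227:5555"]
-- }
--
-- # Inverted index: device_id -> owning user, built once.
-- _rev = {ip: user for user, ips in device_user.items() for ip in ips}
--
-- def get_user_passwd(device_id):
--     return device_passwd.get(_rev.get(device_id, ''), '')
-- ===== Notes on version B (the rewrite author's own statement) =====
-- stated objective: idiomatic
-- what changed: Replaces the explicit search-and-break loop over device_user (a membership scan per user) with a precomputed inverted index mapping each device_id to its user, so the lookup is two dict .get calls with empty-string fallbacks.
import Mathlib
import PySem

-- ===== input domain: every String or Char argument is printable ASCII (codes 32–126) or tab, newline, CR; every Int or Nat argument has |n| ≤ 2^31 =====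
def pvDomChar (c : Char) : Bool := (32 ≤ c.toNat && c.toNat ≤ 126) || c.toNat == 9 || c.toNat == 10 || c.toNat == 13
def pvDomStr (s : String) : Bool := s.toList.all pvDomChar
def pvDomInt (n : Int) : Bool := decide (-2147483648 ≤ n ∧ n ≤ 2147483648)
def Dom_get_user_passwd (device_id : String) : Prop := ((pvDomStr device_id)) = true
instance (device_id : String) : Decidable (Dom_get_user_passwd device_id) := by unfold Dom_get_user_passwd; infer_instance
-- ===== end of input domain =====

-- B replaces A's search-and-break loop over device_user with a precomputed inverted
-- index (device_id -> user) and two dict lookups with empty-string fallbacks (idiomatic).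

-- ===== PORT A =====
def pvDevicePasswd : PySem.Dict String String :=
  PySem.Dict.ofList [("wxk", "910729"), ("fl", "191729"), ("cpc", "2325"), ("cpc2", "123456")]

def pvDeviceUser : PySem.Dict String (List String) :=
  PySem.Dict.ofList
    [("wxk", ["192.168.101.101:5555", "192.168.31.123:5555", "QKXUT20329000108"]),
     ("fl", ["192.168.101.100:5555", "94P0220C01001100"]),
     ("cpc", ["192.168.101.103:5555", "192.168.31.212:5555"]),
     ("cpc2", ["192.168.101.104:5555", "192.168.31.227:5555"])]

-- the 'for k, v in device_user.items(): if device_id in v: user = k; break' loop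
def pvFindUser (device_id : String) : List (String × List String) → String
  | [] => ""
  | (k, v) :: rest => if v.contains device_id then k else pvFindUser device_id rest

def get_user_passwd (device_id : String) : String :=
  let user := pvFindUser device_id pvDeviceUser.items
  if user = "" then ""
  else if ¬ (pvDevicePasswd.keys.contains user) then ""
  else pvDevicePasswd.getD user ""   -- guarded by the contains check, so exact for device_passwd[user]

-- ===== PORT B =====
-- _rev = {ip: user for user, ips in device_user.items() for ip in ips}
def pvRev : PySem.Dict String String :=
  PySem.Dict.ofList (pvDeviceUser.items.flatMap (fun p => p.2.map (fun ip => (ip, p.1))))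

def get_user_passwd_alt (device_id : String) : String :=
  pvDevicePasswd.getD (pvRev.getD device_id "") ""

-- ===== PRECONDITION & SPEC =====
def Spec_get_user_passwd (device_id : String) (out : String) : Prop := out = get_user_passwd_alt device_id
instance (device_id : String) (out : String) : Decidable (Spec_get_user_passwd device_id out) := by unfold Spec_get_user_passwd; infer_instance

-- ===== CLAIM (what is proved, stated in full; the proofs are below) =====
def Claim_equal_get_user_passwd : Prop := ∀ (device_id : String), Dom_get_user_passwd device_id → Spec_get_user_passwd device_id (get_user_passwd device_id)

-- ===== LEMMAS AND PROOFS =====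

-- ===== VERDICT (by name: the statement is the Claim_ definition above) =====
theorem get_user_passwd_spec : Claim_equal_get_user_passwd := by
  intro d _
  unfold Spec_get_user_passwd get_user_passwd get_user_passwd_alt
  by_cases h1 : d = "192.168.101.101:5555"; · subst h1; decide
  by_cases h2 : d = "192.168.31.123:5555"; · subst h2; decide
  by_cases h3 : d = "QKXUT20329000108"; · subst h3; decide
  by_cases h4 : d = "192.168.101.100:5555"; · subst h4; decide
  by_cases h5 : d = "94P0220C01001100"; · subst h5; decide
  by_cases h6 : d = "192.168.101.103:5555"; · subst h6; decide
  by_cases h7 : d = "192.168.31.212:5555"; · subst h7; decide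
  by_cases h8 : d = "192.168.101.104:5555"; · subst h8; decide
  by_cases h9 : d = "192.168.31.227:5555"; · subst h9; decide
  have hu : pvDeviceUser.items =
      [("wxk", ["192.168.101.101:5555", "192.168.31.123:5555", "QKXUT20329000108"]),
       ("fl", ["192.168.101.100:5555", "94P0220C01001100"]),
       ("cpc", ["192.168.101.103:5555", "192.168.31.212:5555"]),
       ("cpc2", ["192.168.101.104:5555", "192.168.31.227:5555"])] := rfl
  have hfind : pvFindUser d pvDeviceUser.items = "" := by
    rw [hu]
    simp only [pvFindUser, List.contains_cons, List.contains_nil]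
    simp [h1, h2, h3, h4, h5, h6, h7, h8, h9]
  have hrev : pvRev.getD d "" = "" := by
    have : pvRev = PySem.Dict.mk
        [("192.168.101.101:5555", "wxk"), ("192.168.31.123:5555", "wxk"), ("QKXUT20329000108", "wxk"),
         ("192.168.101.100:5555", "fl"), ("94P0220C01001100", "fl"),
         ("192.168.101.103:5555", "cpc"), ("192.168.31.212:5555", "cpc"),
         ("192.168.101.104:5555", "cpc2"), ("192.168.31.227:5555", "cpc2")] := rfl
    rw [this]
    simp [PySem.Dict.getD_eq_get?_getD,
      Ne.symm h1, Ne.symm h2, Ne.symm h3, Ne.symm h4, Ne.symm h5, Ne.symm h6,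
      Ne.symm h7, Ne.symm h8, Ne.symm h9, PySem.Dict.get?]
  rw [hfind, hrev]
  decide
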